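-- pv_equiv track=rewrite | github.com/joshnavi28/Ai-legal-assisstant | backend/speech_features.py | _process_legal_context
-- ===== SOURCE A (Python) =====
-- def _process_legal_context(text: str) -> str:
--     """Process text for legal context awareness"""
--     # Add pauses for legal terms
--     legal_terms = [
--         "Article", "Section", "Clause", "Subsection",
--         "Constitution", "Act", "Regulation", "Statute"
--     ]
--
--     processed_text = text
--     for term in legal_terms:
--         if term in processed_text:
--             # Add slight pause before legal terms
--             processed_text = processed_text.replace(term, f" ... {term}")
--
--     return processed_text
-- ===== SOURCE B (Python) =====
-- def _process_legal_context(text: str) -> str: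
--     """Process text for legal context awareness (single left-to-right scan)."""
--     legal_terms = [
--         "Article", "Section", "Clause", "Subsection",
--         "Constitution", "Act", "Regulation", "Statute"
--     ]
--     pieces = []
--     i = 0
--     n = len(text)
--     while i < n:
--         for term in legal_terms:
--             if text.startswith(term, i):
--                 pieces.append(" ... " + term)
--                 i += len(term)
--                 break
--         else:
--             pieces.append(text[i])
--             i += 1
--     return "".join(pieces)
-- ===== Notes on version B (the rewrite author's own statement) =====
-- stated objective: alternative
-- what changed: Replaced the eight sequential whole-string replace passes by a single left-to-right scan that checks each position for a legal term and inserts the pause marker in one pass.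
import Mathlib
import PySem

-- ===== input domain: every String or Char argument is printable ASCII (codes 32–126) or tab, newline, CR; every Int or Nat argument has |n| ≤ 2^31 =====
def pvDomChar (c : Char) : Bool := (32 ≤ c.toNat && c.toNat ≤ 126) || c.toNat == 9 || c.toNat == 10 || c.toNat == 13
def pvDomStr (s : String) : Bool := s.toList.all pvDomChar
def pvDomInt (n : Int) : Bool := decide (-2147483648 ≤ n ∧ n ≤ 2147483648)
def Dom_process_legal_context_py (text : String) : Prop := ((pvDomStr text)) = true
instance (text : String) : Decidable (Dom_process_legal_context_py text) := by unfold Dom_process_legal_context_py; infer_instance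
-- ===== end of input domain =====

-- B replaces A's eight sequential whole-string replace passes by one left-to-right scan that
-- inserts the pause marker at each matched term (objective: alternative, same cost).

-- ===== PORT A =====
-- A's in-function list of legal terms, in A's order
def pvLegalTerms : List String :=
  ["Article", "Section", "Clause", "Subsection",
   "Constitution", "Act", "Regulation", "Statute"]

-- literal port of A: for each term, `if term in processed: processed = processed.replace(term, " ... " + term)`
def process_legal_context_py (text : String) : String :=
  pvLegalTerms.foldl
    (fun processed term =>
      if PySem.Str.isIn term processed then
        PySem.Str.replace processed term (" ... " ++ term)
      else processed)
    text

-- ===== PORT B =====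
-- B's term list on the character level (same terms, same order)
def pvTermsB : List (List Char) :=
  [['A','r','t','i','c','l','e'], ['S','e','c','t','i','o','n'],
   ['C','l','a','u','s','e'], ['S','u','b','s','e','c','t','i','o','n'],
   ['C','o','n','s','t','i','t','u','t','i','o','n'], ['A','c','t'],
   ['R','e','g','u','l','a','t','i','o','n'], ['S','t','a','t','u','t','e']]

def pvPause : List Char := [' ', '.', '.', '.', ' ']

-- every term is nonempty (cited by pvScan's termination proof)
theorem pvTermsB_nonempty : ∀ t ∈ pvTermsB, 0 < t.length := by decide

-- B's while-loop: at each position try the terms in order (`text.startswith(term, i)` is the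
-- prefix test on the remaining characters, ported with List.isPrefixOf — exact on all inputs);
-- on a match emit the pause marker and the term and jump past it, else copy one character.
def pvScan (l : List Char) : List Char :=
  match hfind : pvTermsB.find? (fun t => t.isPrefixOf l) with
  | some tm => pvPause ++ tm ++ pvScan (l.drop tm.length)
  | none =>
    match l with
    | [] => []
    | c :: t => c :: pvScan t
termination_by l.length
decreasing_by
  · have h1 := pvTermsB_nonempty _ (List.mem_of_find?_eq_some hfind)
    have h2 : tm.isPrefixOf l = true := by simpa using List.find?_some hfind
    have h3 : tm.length ≤ l.length := (List.isPrefixOf_iff_prefix.mp h2).length_le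
    simp only [List.length_drop]
    omega
  · simp

def process_legal_context_py_alt (text : String) : String :=
  String.ofList (pvScan text.toList)

-- ===== PRECONDITION & SPEC =====
def Spec_process_legal_context_py (text : String) (out : String) : Prop := out = process_legal_context_py_alt text
instance (text : String) (out : String) : Decidable (Spec_process_legal_context_py text out) := by unfold Spec_process_legal_context_py; infer_instance

-- ===== CLAIM (what is proved, stated in full; the proofs are below) =====
def Claim_equal_process_legal_context_py : Prop := ∀ (text : String), Dom_process_legal_context_py text → Spec_process_legal_context_py text (process_legal_context_py text)

-- ===== LEMMAS AND PROOFS =====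

-- repOne old new s is Python's s.replace(old, new) for nonempty old, as structural recursion
def repOne (old new : List Char) (s : List Char) : List Char :=
  match s with
  | [] => []
  | c :: t =>
    if old ≠ [] ∧ old.isPrefixOf (c :: t) then new ++ repOne old new ((c :: t).drop old.length)
    else c :: repOne old new t
termination_by s.length
decreasing_by
  · simp only [List.length_drop]
    rename_i h
    have : 0 < old.length := List.length_pos_iff.mpr h.1
    simp; omega
  · simp

theorem go_eq (old new : List Char) (hold : old ≠ []) :
    ∀ fuel (l acc : List Char), l.length ≤ fuel →
      PySem.Chars.replace.go old new fuel l acc = acc.reverse ++ repOne old new l := by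
  intro fuel
  induction fuel with
  | zero => intro l acc h
            have : l = [] := List.length_eq_zero_iff.mp (Nat.le_zero.mp h)
            subst this
            simp [PySem.Chars.replace.go, repOne]
  | succ n ih =>
    intro l acc h
    match l with
    | [] => simp [PySem.Chars.replace.go, repOne]
    | c :: t =>
      rw [PySem.Chars.replace.go]
      by_cases hp : old.isPrefixOf (c :: t)
      · rw [if_pos hp, ih _ _ (by have := List.length_pos_iff.mpr hold; simp at h ⊢; omega)]
        rw [repOne, if_pos ⟨hold, hp⟩]
        simp
      · rw [if_neg hp, ih _ _ (by simp at h ⊢; omega)]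
        rw [repOne, if_neg (by simp [hp])]
        simp

theorem replace_eq_repOne (old new s : List Char) (hold : old ≠ []) :
    PySem.Chars.replace s old new = repOne old new s := by
  rw [PySem.Chars.replace, if_neg (by simp [hold])]
  simpa using go_eq old new hold s.length s [] le_rfl

theorem repOne_of_not_infix (old new : List Char) (_hold : old ≠ []) :
    ∀ s, ¬ old <:+: s → repOne old new s = s := by
  intro s
  induction s with
  | nil => intro _; rw [repOne]
  | cons c t ih =>
    intro h
    rw [repOne, if_neg, ih]
    · intro hi; exact h (hi.trans (List.infix_cons_iff.mpr (Or.inr (List.infix_refl t))))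
    · rintro ⟨_, hp⟩
      exact h ((List.isPrefixOf_iff_prefix.mp hp).isInfix)

theorem repOne_append (old new u v : List Char)
    (h : ∀ i, i < u.length → ¬ old <+: (u ++ v).drop i) :
    repOne old new (u ++ v) = u ++ repOne old new v := by
  induction u with
  | nil => simp
  | cons c u' ih =>
    rw [List.cons_append, repOne, if_neg]
    · rw [ih (fun i hi => by simpa using h (i+1) (by simp; omega))]
      simp
    · rintro ⟨_, hp⟩
      have := h 0 (by simp)
      simp at this
      exact this (List.isPrefixOf_iff_prefix.mp hp)

def stepR (s t : List Char) : List Char := repOne t (pvPause ++ t) s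

theorem F_nonempty : ∀ t ∈ pvTermsB, t ≠ [] := by decide
theorem F_alpha : ∀ t ∈ pvTermsB, t.all Char.isAlpha := by decide
theorem F_noprefix : ∀ a ∈ pvTermsB, ∀ b ∈ pvTermsB, a ≠ b → ¬ a <+: b := by decide
theorem F_nodup : pvTermsB.Nodup := by decide
theorem F_internal_b : (pvTermsB.all (fun a => pvTermsB.all (fun b =>
    (List.range a.length).all (fun i => i == 0 || a.getD i ' ' != b.getD 0 ' ')))) = true := by decide
theorem F_internal : ∀ a ∈ pvTermsB, ∀ b ∈ pvTermsB, ∀ i, 1 ≤ i → i < a.length →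
    a.getD i ' ' ≠ b.getD 0 ' ' := by
  intro a ha b hb i h1 hi
  have h := F_internal_b
  rw [List.all_eq_true] at h
  have h := h a ha
  rw [List.all_eq_true] at h
  have h := h b hb
  rw [List.all_eq_true] at h
  have h := h i (List.mem_range.mpr hi)
  simp at h
  rcases h with h | h
  · omega
  · exact h
-- a term t (all letters) can only be a prefix of repOne's output if it was a prefix of the input
theorem prefix_reflect (old : List Char) (c0 : Char) (w : List Char) (hc0 : c0.isAlpha = false) :
    ∀ u t, t.all Char.isAlpha → t <+: repOne old (c0 :: w) u → t <+: u := by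
  intro u
  induction u with
  | nil => intro t ht h; rwa [repOne] at h
  | cons c v ih =>
    intro t ht h
    rw [repOne] at h
    split at h
    · match t, h with
      | [], _ => exact List.nil_prefix
      | t0 :: t', h =>
        have h0 : t0 = c0 := (List.cons_prefix_cons.mp h).1
        simp [List.all_cons, h0, hc0] at ht
    · match t, h with
      | [], _ => exact List.nil_prefix
      | t0 :: t', h =>
        obtain ⟨h0, h1⟩ := List.cons_prefix_cons.mp h
        exact h0 ▸ List.cons_prefix_cons.mpr ⟨rfl, ih t' (by rw [List.all_cons, Bool.and_eq_true] at ht; exact ht.2) h1⟩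

-- at most one term matches at a given position
theorem uniq_match (a b l : List Char) (ha : a ∈ pvTermsB) (hb : b ∈ pvTermsB)
    (hpa : a <+: l) (hpb : b <+: l) : a = b := by
  by_contra hne
  rcases Nat.le_total a.length b.length with h | h
  · exact F_noprefix a ha b hb hne (List.prefix_of_prefix_length_le hpa hpb h)
  · exact F_noprefix b hb a ha (Ne.symm hne) (List.prefix_of_prefix_length_le hpb hpa h)

theorem prefix_head (b x : List Char) (hb : b ≠ []) (h : b <+: x) :
    x.getD 0 ' ' = b.getD 0 ' ' := by
  match b, hb with
  | b0 :: b', _ =>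
    match x with
    | [] => exact absurd (List.prefix_nil.mp h) (by simp)
    | x0 :: x' => simp [(List.cons_prefix_cons.mp h).1]

theorem getD_drop_append (u z : List Char) (i : Nat) (h : i < u.length) :
    (u.drop i ++ z).getD 0 ' ' = u.getD i ' ' := by
  have hdne : u.drop i ≠ [] := by
    intro hh; rw [List.drop_eq_nil_iff] at hh; omega
  match hd : u.drop i, hdne with
  | d0 :: d', _ =>
    have h2 : (List.drop i u)[0]? = u[i + 0]? := List.getElem?_drop
    rw [hd] at h2
    simp at h2
    simp [List.getD, h2.symm]

theorem all_alpha_head (b : List Char) (hb : b ≠ []) (hall : b.all Char.isAlpha) :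
    (b.getD 0 ' ').isAlpha = true := by
  match b, hb with
  | b0 :: b', _ =>
    rw [List.all_cons, Bool.and_eq_true] at hall
    simpa using hall.1

theorem F_pause_getD_b : ((List.range pvPause.length).all (fun i => !(pvPause.getD i ' ').isAlpha)) = true := by decide
theorem F_pause_getD : ∀ i ∈ List.range pvPause.length, (pvPause.getD i ' ').isAlpha = false := by
  intro i hi
  simpa using List.all_eq_true.mp F_pause_getD_b i hi

-- a different term b cannot match anywhere inside an occurrence of term a
theorem L1 (a b m : List Char) (ha : a ∈ pvTermsB) (hb : b ∈ pvTermsB) (hne : b ≠ a) :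
    ∀ i, i < a.length → ¬ b <+: (a ++ m).drop i := by
  intro i hi hp
  match i with
  | 0 =>
    simp at hp
    exact hne (uniq_match b a (a ++ m) hb ha hp (List.prefix_append a m))
  | Nat.succ j =>
    rw [List.drop_append_of_le_length (by omega)] at hp
    have hhead := prefix_head b _ (F_nonempty b hb) hp
    rw [getD_drop_append a m (j+1) (by omega)] at hhead
    exact F_internal a ha b hb (j+1) (by omega) (by omega) hhead

-- nor inside the inserted "pause ++ a" block
theorem L2 (a b m : List Char) (ha : a ∈ pvTermsB) (hb : b ∈ pvTermsB) (hne : b ≠ a) :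
    ∀ i, i < (pvPause ++ a).length → ¬ b <+: ((pvPause ++ a) ++ m).drop i := by
  intro i hi hp
  by_cases h5 : i < pvPause.length
  · rw [List.append_assoc, List.drop_append_of_le_length (by omega)] at hp
    have hhead := prefix_head b _ (F_nonempty b hb) hp
    rw [getD_drop_append pvPause (a ++ m) i h5] at hhead
    have h1 := all_alpha_head b (F_nonempty b hb) (F_alpha b hb)
    have h2 := F_pause_getD i (by simpa using h5)
    rw [hhead, h1] at h2
    simp at h2
  · rw [List.append_assoc, List.drop_append] at hp
    rw [List.drop_eq_nil_iff.mpr (by simpa using h5), List.nil_append] at hp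
    simp at hi h5
    exact L1 a b m ha hb hne (i - pvPause.length) (by simp [pvPause] at *; omega) hp

theorem chain_nil (ts : List (List Char)) : ts.foldl stepR [] = [] := by
  induction ts with
  | nil => rfl
  | cons t ts' ih => simpa [stepR, repOne] using ih

theorem chain_append_head (a : List Char) (ha : a ∈ pvTermsB) :
    ∀ (ts : List (List Char)), (∀ t ∈ ts, t ∈ pvTermsB ∧ t ≠ a) → ∀ m,
      ts.foldl stepR (a ++ m) = a ++ ts.foldl stepR m := by
  intro ts
  induction ts with
  | nil => intro _ m; rfl
  | cons t ts' ih =>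
    intro hts m
    have h1 := hts t (by simp)
    have hstep : stepR (a ++ m) t = a ++ stepR m t := by
      exact repOne_append t (pvPause ++ t) a m (fun i hi => L1 a t m ha h1.1 h1.2 i hi)
    simp only [List.foldl_cons, hstep]
    exact ih (fun t' ht' => hts t' (by simp [ht'])) (stepR m t)

theorem chain_append_pause (a : List Char) (ha : a ∈ pvTermsB) :
    ∀ (ts : List (List Char)), (∀ t ∈ ts, t ∈ pvTermsB ∧ t ≠ a) → ∀ m,
      ts.foldl stepR ((pvPause ++ a) ++ m) = (pvPause ++ a) ++ ts.foldl stepR m := by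
  intro ts
  induction ts with
  | nil => intro _ m; rfl
  | cons t ts' ih =>
    intro hts m
    have h1 := hts t (by simp)
    have hstep : stepR ((pvPause ++ a) ++ m) t = (pvPause ++ a) ++ stepR m t := by
      exact repOne_append t (pvPause ++ t) (pvPause ++ a) m (fun i hi => L2 a t m ha h1.1 h1.2 i hi)
    simp only [List.foldl_cons, hstep]
    exact ih (fun t' ht' => hts t' (by simp [ht'])) (stepR m t)

theorem chain_cons_skip (c : Char) :
    ∀ (ts : List (List Char)), (∀ t ∈ ts, t ∈ pvTermsB) → ∀ v,
      (∀ t ∈ pvTermsB, ¬ t <+: c :: v) →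
      ts.foldl stepR (c :: v) = c :: ts.foldl stepR v := by
  intro ts
  induction ts with
  | nil => intro _ v _; rfl
  | cons t ts' ih =>
    intro hts v h0
    have ht := hts t (by simp)
    have hstep : stepR (c :: v) t = c :: stepR v t := by
      rw [stepR, repOne, if_neg]
      · rfl
      · rintro ⟨_, hp⟩
        exact h0 t ht (List.isPrefixOf_iff_prefix.mp hp)
    simp only [List.foldl_cons, hstep]
    apply ih (fun t' ht' => hts t' (by simp [ht'])) (stepR v t)
    intro t' ht' hp
    have hne := F_nonempty t' ht'
    have hall := F_alpha t' ht'
    match t', hne, hall, ht', hp with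
    | t0 :: t'', _, hall, ht', hp =>
      obtain ⟨h0', h1⟩ := List.cons_prefix_cons.mp hp
      have halpha : t''.all Char.isAlpha := by
        rw [List.all_cons, Bool.and_eq_true] at hall
        exact hall.2
      have : t'' <+: v := prefix_reflect t (' ') _ (by decide) v t'' halpha h1
      exact h0 (t0 :: t'') ht' (h0' ▸ List.cons_prefix_cons.mpr ⟨rfl, this⟩)

theorem pvScan_some (l tm : List Char) (h : pvTermsB.find? (fun t => t.isPrefixOf l) = some tm) :
    pvScan l = pvPause ++ tm ++ pvScan (l.drop tm.length) := by
  rw [pvScan]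
  split
  · rename_i tm' hfind
    injection (h.symm.trans hfind) with he
    rw [he]
  · rename_i hfind
    rw [hfind] at h
    cases h

theorem pvScan_none_nil (h : pvTermsB.find? (fun t => t.isPrefixOf ([] : List Char)) = none) :
    pvScan [] = [] := by
  rw [pvScan]
  split
  · rename_i tm' hfind
    rw [hfind] at h; cases h
  · rfl

theorem pvScan_none_cons (c : Char) (v : List Char)
    (h : pvTermsB.find? (fun t => t.isPrefixOf (c :: v)) = none) :
    pvScan (c :: v) = c :: pvScan v := by
  rw [pvScan]
  split
  · rename_i tm' hfind
    rw [hfind] at h; cases h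
  · rfl

theorem chain_eq_scan : ∀ (n : Nat) (l : List Char), l.length ≤ n →
    List.foldl stepR l pvTermsB = pvScan l := by
  intro n
  induction n with
  | zero =>
    intro l hl
    have : l = [] := List.length_eq_zero_iff.mp (Nat.le_zero.mp hl)
    subst this
    rw [chain_nil, pvScan_none_nil]
    rw [List.find?_eq_none]
    intro t ht
    simp [List.isPrefixOf_iff_prefix, List.prefix_nil]
    exact F_nonempty t ht
  | succ n ih =>
    intro l hl
    cases hfind : pvTermsB.find? (fun t => t.isPrefixOf l) with
    | some tm =>
      have htm : tm ∈ pvTermsB := List.mem_of_find?_eq_some hfind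
      have hpre : tm <+: l := List.isPrefixOf_iff_prefix.mp (by simpa using List.find?_some hfind)
      set rest := l.drop tm.length with hrest
      have hl2 : tm ++ rest = l := by
        obtain ⟨t, ht⟩ := hpre
        rw [hrest, ← ht, List.drop_left]
      obtain ⟨pre, post, hsplit⟩ := List.append_of_mem htm
      have hnd := F_nodup
      rw [hsplit, List.nodup_append] at hnd
      have hpremem : ∀ t ∈ pre, t ∈ pvTermsB ∧ t ≠ tm := by
        intro t ht
        refine ⟨by rw [hsplit]; simp [ht], ?_⟩
        intro he
        exact hnd.2.2 t ht tm (List.mem_cons_self ..) he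
      have hpostmem : ∀ t ∈ post, t ∈ pvTermsB ∧ t ≠ tm := by
        intro t ht
        refine ⟨by rw [hsplit]; simp [ht], ?_⟩
        intro he
        have := hnd.2.1
        rw [List.nodup_cons] at this
        exact this.1 (he ▸ ht)
      rw [hsplit, List.foldl_append, List.foldl_cons]
      rw [← hl2, chain_append_head tm htm pre hpremem rest]
      have hstep : stepR (tm ++ List.foldl stepR rest pre) tm
          = (pvPause ++ tm) ++ stepR (List.foldl stepR rest pre) tm := by
        set M := List.foldl stepR rest pre
        match tm, F_nonempty tm htm with
        | c0 :: tm', _ =>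
          rw [List.cons_append, stepR, repOne, if_pos]
          · rw [← List.cons_append, List.drop_left]
            simp [stepR]
          · exact ⟨by simp, List.isPrefixOf_iff_prefix.mpr (List.cons_prefix_cons.mpr ⟨rfl, tm'.prefix_append M⟩)⟩
      rw [hstep, chain_append_pause tm htm post hpostmem]
      have hfold : List.foldl stepR (stepR (List.foldl stepR rest pre) tm) post
          = List.foldl stepR rest pvTermsB := by
        rw [hsplit, List.foldl_append, List.foldl_cons]
      rw [hfold]
      have hrlen : rest.length ≤ n := by
        have h1 := pvTermsB_nonempty tm htm
        have h2 : l.length = tm.length + rest.length := by rw [← hl2]; simp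
        omega
      rw [ih rest hrlen, hl2, pvScan_some l tm hfind, ← hrest]
    | none =>
      have h0 : ∀ t ∈ pvTermsB, ¬ t <+: l := by
        intro t ht hp
        have := List.find?_eq_none.mp hfind t ht
        simp [List.isPrefixOf_iff_prefix] at this
        exact this hp
      match l with
      | [] => rw [chain_nil, pvScan_none_nil hfind]
      | c :: v =>
        rw [chain_cons_skip c pvTermsB (fun _ ht => ht) v h0]
        rw [ih v (by simpa using Nat.lt_succ_iff.mp (by simpa using hl)), pvScan_none_cons c v hfind]

def stepChars (sl tl : List Char) : List Char :=
  if PySem.Chars.isIn tl sl then PySem.Chars.replace sl tl (" ... ".toList ++ tl) else sl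

theorem stepA_toList : ∀ (ts : List String) (s : String),
    (ts.foldl (fun processed term =>
      if PySem.Str.isIn term processed then
        PySem.Str.replace processed term (" ... " ++ term)
      else processed) s).toList
    = List.foldl stepChars s.toList (ts.map String.toList) := by
  intro ts
  induction ts with
  | nil => intro s; rfl
  | cons t ts' ih =>
    intro s
    rw [List.map_cons, List.foldl_cons, List.foldl_cons, ih]
    congr 1
    rw [stepChars]
    by_cases h : PySem.Str.isIn t s = true
    · rw [if_pos h, if_pos (by simpa using h)]
      simp [PySem.Str.toList_replace, String.toList_append]
    · rw [if_neg h, if_neg (by simpa using h)]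

theorem pause_toList : " ... ".toList = pvPause := by decide

theorem stepChars_eq_stepR (sl tl : List Char) (h : tl ∈ pvTermsB) :
    stepChars sl tl = stepR sl tl := by
  rw [stepChars, stepR, pause_toList]
  by_cases hin : PySem.Chars.isIn tl sl = true
  · rw [if_pos hin, replace_eq_repOne tl (pvPause ++ tl) sl (F_nonempty tl h)]
  · rw [if_neg hin, repOne_of_not_infix tl (pvPause ++ tl) (F_nonempty tl h) sl
      ((PySem.Chars.isIn_eq_false_iff tl sl).mp (by simpa using hin))]

theorem foldl_chars_eq_stepR : ∀ (ts : List (List Char)), (∀ t ∈ ts, t ∈ pvTermsB) →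
    ∀ sl, List.foldl stepChars sl ts = List.foldl stepR sl ts := by
  intro ts
  induction ts with
  | nil => intro _ _; rfl
  | cons t ts' ih =>
    intro hts sl
    rw [List.foldl_cons, List.foldl_cons, stepChars_eq_stepR sl t (hts t (by simp))]
    exact ih (fun t' ht' => hts t' (by simp [ht'])) _

theorem terms_map : pvLegalTerms.map String.toList = pvTermsB := by decide

theorem A_eq_B (text : String) : process_legal_context_py text = process_legal_context_py_alt text := by
  have h1 : (process_legal_context_py text).toList = pvScan text.toList := by
    rw [process_legal_context_py, stepA_toList, terms_map,
      foldl_chars_eq_stepR pvTermsB (fun _ h => h) text.toList,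
      chain_eq_scan text.toList.length text.toList le_rfl]
  rw [process_legal_context_py_alt, ← h1, String.ofList_toList]

-- ===== VERDICT (by name: the statement is the Claim_ definition above) =====
theorem process_legal_context_py_spec : Claim_equal_process_legal_context_py := by
  intro text _
  exact A_eq_B text
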